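-- pv_equiv track=rewrite | github.com/FugitiveExpert01/ComfyUI-FEnodes | nodes_tiling.py | _canvas_pyramid_sizes
-- ===== SOURCE A (Python) =====
-- def _canvas_pyramid_sizes(orig_h, orig_w, levels):
--     """
--     Compute canvas (H, W) at each pyramid level.
--
--     Uses the same floor-division that F.interpolate(scale_factor=0.5)
--     applies internally, so canvas and tile pyramids stay aligned.
--     """
--     sizes = []
--     h, w = orig_h, orig_w
--     for _ in range(levels):
--         sizes.append((h, w))
--         h = h // 2
--         w = w // 2
--     return sizes
-- ===== SOURCE B (Python) =====
-- def _canvas_pyramid_sizes(orig_h, orig_w, levels):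
--     """Closed form: level i is floor-division by 2**i, computed as an arithmetic
--     right shift (n >> i == n // 2**i for Python ints, negatives included)."""
--     return [(orig_h >> i, orig_w >> i) for i in range(levels)]
-- ===== Notes on version B (the rewrite author's own statement) =====
-- stated objective: simpler
-- what changed: Replaced the stateful repeated-halving loop by a closed-form comprehension computing each level independently as an arithmetic right shift orig >> i (exactly orig // 2**i), with no carried h/w state.
import Mathlib
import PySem

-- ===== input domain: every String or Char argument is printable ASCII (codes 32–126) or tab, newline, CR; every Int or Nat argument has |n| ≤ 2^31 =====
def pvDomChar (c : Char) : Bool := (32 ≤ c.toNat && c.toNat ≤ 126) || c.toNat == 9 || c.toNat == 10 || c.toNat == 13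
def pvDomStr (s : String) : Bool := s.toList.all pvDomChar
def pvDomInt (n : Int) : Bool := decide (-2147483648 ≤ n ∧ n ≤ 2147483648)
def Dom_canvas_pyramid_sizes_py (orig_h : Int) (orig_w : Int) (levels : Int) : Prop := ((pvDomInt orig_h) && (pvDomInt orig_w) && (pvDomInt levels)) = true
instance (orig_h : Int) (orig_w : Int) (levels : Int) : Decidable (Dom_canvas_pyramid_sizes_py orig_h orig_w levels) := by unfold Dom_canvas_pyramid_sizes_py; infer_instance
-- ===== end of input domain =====

-- B replaces A's stateful halving loop with a closed-form per-level division by 2^i (simpler).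

-- ===== PORT A =====
-- A: sizes = []; h, w = orig_h, orig_w; for _ in range(levels): append (h,w); h //= 2; w //= 2
def canvas_pyramid_sizes_py (orig_h : Int) (orig_w : Int) (levels : Int) : List (Int × Int) :=
  (PySem.List.pyRange 0 levels 1).foldl
    (fun (st : List (Int × Int) × Int × Int) _ =>
      (st.1 ++ [(st.2.1, st.2.2)], PySem.Int.floordiv st.2.1 2, PySem.Int.floordiv st.2.2 2))
    ([], orig_h, orig_w)
  |>.1

-- ===== PORT B =====
-- B: [(orig_h >> i, orig_w >> i) for i in range(levels)]; Python's arithmetic right shift n >> i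
-- is exactly floor division by 2^i (negatives included), ported as floordiv _ (2^i).
def canvas_pyramid_sizes_py_alt (orig_h : Int) (orig_w : Int) (levels : Int) : List (Int × Int) :=
  (PySem.List.pyRange 0 levels 1).map
    (fun i => (PySem.Int.floordiv orig_h (2 ^ i.toNat), PySem.Int.floordiv orig_w (2 ^ i.toNat)))

-- ===== PRECONDITION & SPEC =====
def Spec_canvas_pyramid_sizes_py (orig_h : Int) (orig_w : Int) (levels : Int) (out : List (Int × Int)) : Prop := out = canvas_pyramid_sizes_py_alt orig_h orig_w levels
instance (orig_h : Int) (orig_w : Int) (levels : Int) (out : List (Int × Int)) : Decidable (Spec_canvas_pyramid_sizes_py orig_h orig_w levels out) := by unfold Spec_canvas_pyramid_sizes_py; infer_instance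

-- ===== CLAIM (what is proved, stated in full; the proofs are below) =====
def Claim_equal_canvas_pyramid_sizes_py : Prop := ∀ (orig_h : Int) (orig_w : Int) (levels : Int), Dom_canvas_pyramid_sizes_py orig_h orig_w levels → Spec_canvas_pyramid_sizes_py orig_h orig_w levels (canvas_pyramid_sizes_py orig_h orig_w levels)

-- ===== LEMMAS AND PROOFS =====

-- (h // 2^n) // 2 = h // 2^(n+1) for Python floor division
theorem pv_fdiv_two_pow (h : Int) (n : Nat) :
    PySem.Int.floordiv (PySem.Int.floordiv h (2 ^ n)) 2 = PySem.Int.floordiv h (2 ^ (n + 1)) := by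
  rw [PySem.Int.floordiv_eq_ediv_of_pos (a := h) (by positivity),
      PySem.Int.floordiv_eq_ediv_of_pos (by norm_num),
      PySem.Int.floordiv_eq_ediv_of_pos (a := h) (by positivity)]
  rw [pow_succ]
  exact Int.ediv_ediv_of_nonneg (by positivity)

-- invariant of A's loop over the first n iterations
theorem pv_loop_inv (orig_h orig_w : Int) (n : Nat) :
    (List.range n).foldl
      (fun (st : List (Int × Int) × Int × Int) _ =>
        (st.1 ++ [(st.2.1, st.2.2)], PySem.Int.floordiv st.2.1 2, PySem.Int.floordiv st.2.2 2))
      ([], orig_h, orig_w)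
    = ((List.range n).map
        (fun k => (PySem.Int.floordiv orig_h (2 ^ k), PySem.Int.floordiv orig_w (2 ^ k))),
       PySem.Int.floordiv orig_h (2 ^ n), PySem.Int.floordiv orig_w (2 ^ n)) := by
  induction n with
  | zero => simp [PySem.Int.floordiv]
  | succ n ih =>
      rw [List.range_succ, List.foldl_append, ih, List.map_append]
      refine Prod.ext (by simp) (Prod.ext ?_ ?_) <;> exact pv_fdiv_two_pow _ n

-- ===== VERDICT (by name: the statement is the Claim_ definition above) =====
theorem canvas_pyramid_sizes_py_spec : Claim_equal_canvas_pyramid_sizes_py := by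
  intro orig_h orig_w levels _
  unfold Spec_canvas_pyramid_sizes_py canvas_pyramid_sizes_py canvas_pyramid_sizes_py_alt
  rw [PySem.List.pyRange_one]
  rw [List.foldl_map, List.map_map]
  rw [pv_loop_inv]
  apply List.map_congr_left
  intro k hk
  simp
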